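-- pv_equiv track=rewrite | github.com/fxbeaulieu/PokemonData | get_quick_types_stats.py | get_types_effectiveness_against_pokemon_types
-- ===== SOURCE A (Python) =====
-- def get_types_effectiveness_against_pokemon_types(types_charts,pokemon_type):
--     super_effective_against = []
--     not_very_effective_against = []
--     no_effect_against = []
--
--     for offensive_type,defensive_type_values in types_charts.items():
--         for effectiveness_category,effectiveness_category_types in defensive_type_values.items():
--             if pokemon_type in effectiveness_category_types:
--                 if effectiveness_category == 'super-effective':
--                     super_effective_against.append(offensive_type)
--                 elif effectiveness_category == 'not-very-effective':
--                     not_very_effective_against.append(offensive_type)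
--                 elif effectiveness_category == 'no-effect':
--                     no_effect_against.append(offensive_type)
--
--     return super_effective_against, not_very_effective_against, no_effect_against
-- ===== SOURCE B (Python) =====
-- def get_types_effectiveness_against_pokemon_types(types_charts, pokemon_type):
--     def hits(category):
--         return [offensive_type
--                 for offensive_type, defensive_type_values in types_charts.items()
--                 if pokemon_type in defensive_type_values.get(category, [])]
--     return (hits('super-effective'),
--             hits('not-very-effective'),
--             hits('no-effect'))
-- ===== Notes on version B (the rewrite author's own statement) =====
-- stated objective: simpler
-- what changed: Replaces A's single interleaved pass with if/elif dispatch into three accumulators by one comprehension per category that looks the category up directly with dict.get, returning the three lists built independently.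
import Mathlib
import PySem

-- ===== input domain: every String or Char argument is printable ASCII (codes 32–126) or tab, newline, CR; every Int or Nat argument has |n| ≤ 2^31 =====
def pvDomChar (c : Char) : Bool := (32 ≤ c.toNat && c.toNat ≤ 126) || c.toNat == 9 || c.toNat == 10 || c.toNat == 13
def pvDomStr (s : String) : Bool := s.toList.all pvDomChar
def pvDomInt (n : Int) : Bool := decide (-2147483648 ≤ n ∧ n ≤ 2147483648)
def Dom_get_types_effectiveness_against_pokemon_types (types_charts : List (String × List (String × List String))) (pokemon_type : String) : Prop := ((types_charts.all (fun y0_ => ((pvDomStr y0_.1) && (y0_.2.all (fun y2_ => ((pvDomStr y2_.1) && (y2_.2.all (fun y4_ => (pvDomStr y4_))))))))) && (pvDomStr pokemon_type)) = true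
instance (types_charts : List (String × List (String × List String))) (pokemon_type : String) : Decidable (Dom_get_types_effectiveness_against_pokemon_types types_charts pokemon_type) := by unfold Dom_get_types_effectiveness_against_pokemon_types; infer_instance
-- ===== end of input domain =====

-- B replaces A's single interleaved pass with if/elif dispatch into three accumulators by one
-- direct category lookup (dict.get) per result list; objective: simpler, same cost.

-- ===== PORT A =====
-- Nested for-loops over .items() with three accumulator lists and if/elif dispatch.
def get_types_effectiveness_against_pokemon_types (types_charts : List (String × List (String × List String))) (pokemon_type : String) : List String × List String × List String :=
  types_charts.foldl (fun acc otdv =>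
    otdv.2.foldl (fun acc2 catlst =>
      if catlst.2.contains pokemon_type then
        if catlst.1 = "super-effective" then (acc2.1 ++ [otdv.1], acc2.2.1, acc2.2.2)
        else if catlst.1 = "not-very-effective" then (acc2.1, acc2.2.1 ++ [otdv.1], acc2.2.2)
        else if catlst.1 = "no-effect" then (acc2.1, acc2.2.1, acc2.2.2 ++ [otdv.1])
        else acc2
      else acc2) acc) ([], [], [])

-- ===== PORT B =====
-- one comprehension per category, looking the category up with dict.get(category, [])
def pvHits (types_charts : List (String × List (String × List String))) (pokemon_type : String) (category : String) : List String :=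
  (types_charts.filter (fun p => (PySem.Dict.getD (PySem.Dict.mk p.2) category []).contains pokemon_type)).map Prod.fst

def get_types_effectiveness_against_pokemon_types_alt (types_charts : List (String × List (String × List String))) (pokemon_type : String) : List String × List String × List String :=
  (pvHits types_charts pokemon_type "super-effective",
   pvHits types_charts pokemon_type "not-very-effective",
   pvHits types_charts pokemon_type "no-effect")

-- ===== PRECONDITION & SPEC =====
-- Pre_ excludes association lists whose inner category lists carry a duplicate key: real Python
-- dicts cannot contain them, so A's double-append there is an artefact of the list encoding.
def Pre_get_types_effectiveness_against_pokemon_types (types_charts : List (String × List (String × List String))) (pokemon_type : String) : Prop :=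
  ∀ p ∈ types_charts, (p.2.map Prod.fst).Nodup
instance (types_charts : List (String × List (String × List String))) (pokemon_type : String) : Decidable (Pre_get_types_effectiveness_against_pokemon_types types_charts pokemon_type) := by unfold Pre_get_types_effectiveness_against_pokemon_types; infer_instance

def pvWitness_get_types_effectiveness_against_pokemon_types : (List (String × List (String × List String))) × String :=
  ([("Fire", [("super-effective", ["Grass", "Ice"]), ("not-very-effective", ["Water"])]),
    ("Water", [("super-effective", ["Fire"]), ("no-effect", ["Grass"])])], "Grass")

def Spec_get_types_effectiveness_against_pokemon_types (types_charts : List (String × List (String × List String))) (pokemon_type : String) (out : List String × List String × List String) : Prop := out = get_types_effectiveness_against_pokemon_types_alt types_charts pokemon_type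
instance (types_charts : List (String × List (String × List String))) (pokemon_type : String) (out : List String × List String × List String) : Decidable (Spec_get_types_effectiveness_against_pokemon_types types_charts pokemon_type out) := by unfold Spec_get_types_effectiveness_against_pokemon_types; infer_instance

-- ===== CLAIM (what is proved, stated in full; the proofs are below) =====
def Claim_equal_get_types_effectiveness_against_pokemon_types : Prop := ∀ (types_charts : List (String × List (String × List String))) (pokemon_type : String), Dom_get_types_effectiveness_against_pokemon_types types_charts pokemon_type → Pre_get_types_effectiveness_against_pokemon_types types_charts pokemon_type → Spec_get_types_effectiveness_against_pokemon_types types_charts pokemon_type (get_types_effectiveness_against_pokemon_types types_charts pokemon_type)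

-- ===== LEMMAS AND PROOFS =====

-- per-entry contribution of A's inner loop to each category, without any Nodup assumption
def pvG (pokemon_type : String) (dv : List (String × List String)) (c : String) (ot : String) : List String :=
  (dv.filter (fun p => p.1 = c ∧ pokemon_type ∈ p.2)).map (fun _ => ot)

lemma pvG_nil (pt c ot : String) : pvG pt [] c ot = [] := rfl

lemma pvG_cons (pt c ot cat : String) (lst : List String) (t : List (String × List String)) :
    pvG pt ((cat, lst) :: t) c ot
      = if cat = c ∧ pt ∈ lst then ot :: pvG pt t c ot else pvG pt t c ot := by
  by_cases h : cat = c ∧ pt ∈ lst <;> simp [pvG, h]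

lemma pv_inner (pt ot : String) (dv : List (String × List String)) (acc : List String × List String × List String) :
    dv.foldl (fun acc2 catlst =>
      if catlst.2.contains pt then
        if catlst.1 = "super-effective" then (acc2.1 ++ [ot], acc2.2.1, acc2.2.2)
        else if catlst.1 = "not-very-effective" then (acc2.1, acc2.2.1 ++ [ot], acc2.2.2)
        else if catlst.1 = "no-effect" then (acc2.1, acc2.2.1, acc2.2.2 ++ [ot])
        else acc2
      else acc2) acc
    = (acc.1 ++ pvG pt dv "super-effective" ot,
       acc.2.1 ++ pvG pt dv "not-very-effective" ot,
       acc.2.2 ++ pvG pt dv "no-effect" ot) := by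
  induction dv generalizing acc with
  | nil => simp [pvG_nil]
  | cons h t ih =>
    obtain ⟨cat, lst⟩ := h
    rw [List.foldl_cons, ih]
    by_cases hc : pt ∈ lst
    · by_cases h1 : cat = "super-effective"
      · subst h1
        simp [hc, pvG_cons]
      · by_cases h2 : cat = "not-very-effective"
        · subst h2
          simp [hc, h1, pvG_cons]
        · by_cases h3 : cat = "no-effect"
          · subst h3
            simp [hc, h1, h2, pvG_cons]
          · simp [hc, h1, h2, h3, pvG_cons]
    · simp [hc, pvG_cons]

lemma pvG_of_not_mem (pt ot c : String) (dv : List (String × List String))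
    (h : c ∉ dv.map Prod.fst) : pvG pt dv c ot = [] := by
  induction dv with
  | nil => rfl
  | cons hd t ih =>
    obtain ⟨k, lst⟩ := hd
    simp only [List.map_cons, List.mem_cons, not_or] at h
    rw [pvG_cons]
    have : ¬ (k = c ∧ pt ∈ lst) := fun hx => h.1 (hx.1 ▸ rfl)
    rw [if_neg this]
    exact ih h.2

-- under unique inner keys, the per-entry contribution is one direct lookup
lemma pvG_eq_getD (pt ot c : String) (dv : List (String × List String))
    (hnd : (dv.map Prod.fst).Nodup) :
    pvG pt dv c ot
      = if (PySem.Dict.getD (PySem.Dict.mk dv) c []).contains pt then [ot] else [] := by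
  induction dv with
  | nil => simp [pvG_nil, PySem.Dict.getD, PySem.Dict.get?]
  | cons h t ih =>
    obtain ⟨k, lst⟩ := h
    simp only [List.map_cons, List.nodup_cons] at hnd
    have hg : PySem.Dict.getD (PySem.Dict.mk ((k, lst) :: t)) c []
        = if k = c then lst else PySem.Dict.getD (PySem.Dict.mk t) c [] := by
      rw [PySem.Dict.getD_eq_get?_getD, PySem.Dict.get?_mk_cons]
      by_cases hk : k = c
      · simp [hk]
      · simp [hk, PySem.Dict.getD_eq_get?_getD]
    rw [pvG_cons, hg]
    by_cases hk : k = c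
    · subst hk
      rw [if_pos rfl, pvG_of_not_mem pt ot k t hnd.1]
      by_cases hc : pt ∈ lst <;> simp [hc]
    · rw [if_neg hk, if_neg (fun hx => hk hx.1), ih hnd.2]

lemma pvHits_cons (tc : List (String × List (String × List String))) (pt c : String)
    (h : String × List (String × List String)) :
    pvHits (h :: tc) pt c
      = (if (PySem.Dict.getD (PySem.Dict.mk h.2) c []).contains pt then [h.1] else [])
        ++ pvHits tc pt c := by
  by_cases hm : pt ∈ PySem.Dict.getD (PySem.Dict.mk h.2) c [] <;>
    simp [pvHits, hm]

lemma pv_outer (tc : List (String × List (String × List String))) (pt : String)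
    (hpre : ∀ p ∈ tc, (p.2.map Prod.fst).Nodup)
    (acc : List String × List String × List String) :
    tc.foldl (fun acc otdv =>
      otdv.2.foldl (fun acc2 catlst =>
        if catlst.2.contains pt then
          if catlst.1 = "super-effective" then (acc2.1 ++ [otdv.1], acc2.2.1, acc2.2.2)
          else if catlst.1 = "not-very-effective" then (acc2.1, acc2.2.1 ++ [otdv.1], acc2.2.2)
          else if catlst.1 = "no-effect" then (acc2.1, acc2.2.1, acc2.2.2 ++ [otdv.1])
          else acc2
        else acc2) acc) acc
    = (acc.1 ++ pvHits tc pt "super-effective",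
       acc.2.1 ++ pvHits tc pt "not-very-effective",
       acc.2.2 ++ pvHits tc pt "no-effect") := by
  induction tc generalizing acc with
  | nil => simp [pvHits]
  | cons h t ih =>
    rw [List.foldl_cons, pv_inner,
        ih (fun p hp => hpre p (List.mem_cons_of_mem h hp))]
    rw [pvG_eq_getD pt h.1 _ h.2 (hpre h (List.mem_cons_self)),
        pvG_eq_getD pt h.1 _ h.2 (hpre h (List.mem_cons_self)),
        pvG_eq_getD pt h.1 _ h.2 (hpre h (List.mem_cons_self))]
    simp [pvHits_cons]

-- ===== VERDICT (by name: the statement is the Claim_ definition above) =====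
theorem get_types_effectiveness_against_pokemon_types_spec : Claim_equal_get_types_effectiveness_against_pokemon_types := by
  intro tc pt _ hpre
  unfold Spec_get_types_effectiveness_against_pokemon_types
  unfold get_types_effectiveness_against_pokemon_types get_types_effectiveness_against_pokemon_types_alt
  rw [pv_outer tc pt hpre]
  simp
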